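-- pv_equiv track=rewrite | github.com/sntimmons/recon-kit | api_server.py | _sanitize_log_lines
-- ===== SOURCE A (Python) =====
-- def _sanitize_log_lines(output: str) -> list[str]:
--     lines: list[str] = []
--     skipping_traceback = False
--     for raw_line in output.splitlines():
--         line = raw_line.rstrip()
--         if line.startswith("Traceback (most recent call last):"):
--             if not skipping_traceback:
--                 lines.append("[internal traceback omitted]")
--             skipping_traceback = True
--             continue
--         if skipping_traceback:
--             if line.startswith("  File ") or line.startswith("    "):
--                 continue
--             if ":" in line:
--                 skipping_traceback = False
--                 continue
--             continue
--         lines.append(line)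
--     return lines
-- ===== SOURCE B (Python) =====
-- def _sanitize_log_lines(output: str) -> list[str]:
--     src = output.splitlines()
--     n = len(src)
--     result: list[str] = []
--     i = 0
--     while i < n:
--         line = src[i].rstrip()
--         i += 1
--         if line.startswith("Traceback (most recent call last):"):
--             result.append("[internal traceback omitted]")
--             # consume the rest of the traceback block
--             while i < n:
--                 line = src[i].rstrip()
--                 i += 1
--                 if line.startswith("Traceback (most recent call last):"):
--                     continue
--                 if line.startswith("  File ") or line.startswith("    "):
--                     continue
--                 if ":" in line:
--                     break
--             continue
--         result.append(line)
--     return result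
-- ===== Notes on version B (the rewrite author's own statement) =====
-- stated objective: alternative
-- what changed: Replaces A's boolean skipping-flag fold over all lines with an explicit-index outer loop and a nested inner loop that consumes an entire traceback block at once.
import Mathlib
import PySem

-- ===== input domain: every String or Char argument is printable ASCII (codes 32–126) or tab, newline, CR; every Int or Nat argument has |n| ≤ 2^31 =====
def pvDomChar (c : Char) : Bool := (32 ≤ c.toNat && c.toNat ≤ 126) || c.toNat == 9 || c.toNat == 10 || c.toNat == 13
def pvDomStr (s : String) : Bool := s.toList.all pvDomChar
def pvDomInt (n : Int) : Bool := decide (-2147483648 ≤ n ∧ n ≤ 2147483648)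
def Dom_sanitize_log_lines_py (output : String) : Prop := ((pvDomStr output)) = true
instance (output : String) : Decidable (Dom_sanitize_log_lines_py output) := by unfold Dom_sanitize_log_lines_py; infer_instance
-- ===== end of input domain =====

-- B replaces A's boolean skipping-flag fold with an outer loop plus a nested loop that
-- consumes a whole traceback block at once (objective: alternative decomposition, same cost).

-- ===== PORT A =====
-- one iteration of A's for-loop: state = (lines, skipping_traceback)
def sanStepA (st : List String × Bool) (raw_line : String) : List String × Bool :=
  let line := PySem.Str.rstrip raw_line
  if PySem.Str.startswith line "Traceback (most recent call last):" then
    ((if !st.2 then st.1 ++ ["[internal traceback omitted]"] else st.1), true)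
  else if st.2 then
    if PySem.Str.startswith line "  File " || PySem.Str.startswith line "    " then st
    else if PySem.Str.isIn ":" line then (st.1, false)
    else st
  else (st.1 ++ [line], st.2)

def sanitize_log_lines_py (output : String) : List String :=
  ((PySem.Str.splitlines output).foldl sanStepA ([], false)).1

-- ===== PORT B =====
-- B's inner while-loop: consume the traceback block, return the remaining lines
def sanConsume : List String → List String
  | [] => []
  | raw :: rest =>
    let line := PySem.Str.rstrip raw
    if PySem.Str.startswith line "Traceback (most recent call last):" then sanConsume rest
    else if PySem.Str.startswith line "  File " || PySem.Str.startswith line "    " then sanConsume rest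
    else if PySem.Str.isIn ":" line then rest
    else sanConsume rest

theorem sanConsume_length_le : ∀ ls : List String, (sanConsume ls).length ≤ ls.length := by
  intro ls
  induction ls with
  | nil => simp [sanConsume]
  | cons raw rest ih =>
    simp only [sanConsume]
    split_ifs <;> simp <;> omega

-- B's outer while-loop over the remaining lines
def sanOuter (ls : List String) : List String :=
  match ls with
  | [] => []
  | raw :: rest =>
    let line := PySem.Str.rstrip raw
    if PySem.Str.startswith line "Traceback (most recent call last):" then
      "[internal traceback omitted]" :: sanOuter (sanConsume rest)
    else line :: sanOuter rest
termination_by ls.length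
decreasing_by
  · exact Nat.lt_succ_of_le (sanConsume_length_le rest)
  · simp

def sanitize_log_lines_py_alt (output : String) : List String :=
  sanOuter (PySem.Str.splitlines output)

-- ===== PRECONDITION & SPEC =====
def Spec_sanitize_log_lines_py (output : String) (out : List String) : Prop := out = sanitize_log_lines_py_alt output
instance (output : String) (out : List String) : Decidable (Spec_sanitize_log_lines_py output out) := by unfold Spec_sanitize_log_lines_py; infer_instance

-- ===== CLAIM (what is proved, stated in full; the proofs are below) =====
def Claim_equal_sanitize_log_lines_py : Prop := ∀ (output : String), Dom_sanitize_log_lines_py output → Spec_sanitize_log_lines_py output (sanitize_log_lines_py output)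

-- ===== LEMMAS AND PROOFS =====

-- invariant: A's fold from flag=false produces sanOuter; from flag=true it produces
-- sanOuter of the list with the current traceback block consumed
theorem sanFold_key (ls : List String) : ∀ acc : List String,
    (ls.foldl sanStepA (acc, false)).1 = acc ++ sanOuter ls ∧
    (ls.foldl sanStepA (acc, true)).1 = acc ++ sanOuter (sanConsume ls) := by
  induction ls with
  | nil => intro acc; simp [sanOuter, sanConsume]
  | cons raw rest ih =>
    intro acc
    constructor
    · rw [List.foldl_cons, sanOuter]
      by_cases htb : PySem.Str.startswith (PySem.Str.rstrip raw) "Traceback (most recent call last):" = true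
      · simp only [sanStepA, htb, Bool.not_false, Bool.false_eq_true, reduceIte, if_true, if_false]
        rw [(ih (acc ++ ["[internal traceback omitted]"])).2]
        try simp [sanConsume, htb]
      · simp only [sanStepA, htb, Bool.false_eq_true, reduceIte, if_false]
        rw [(ih (acc ++ [PySem.Str.rstrip raw])).1]
        try simp [sanConsume, htb]
    · rw [List.foldl_cons, sanConsume]
      by_cases htb : PySem.Str.startswith (PySem.Str.rstrip raw) "Traceback (most recent call last):" = true
      · simp only [sanStepA, htb, Bool.not_true, Bool.false_eq_true, reduceIte, if_true, if_false]
        rw [(ih acc).2]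
        try simp [sanConsume, htb]
      · by_cases hf : (PySem.Str.startswith (PySem.Str.rstrip raw) "  File " ||
            PySem.Str.startswith (PySem.Str.rstrip raw) "    ") = true
        · simp only [sanStepA, htb, hf, Bool.false_eq_true, reduceIte, if_true, if_false]
          rw [(ih acc).2]
          try simp [sanConsume, htb, hf]
        · by_cases hc : PySem.Str.isIn ":" (PySem.Str.rstrip raw) = true
          · simp only [sanStepA, htb, hf, hc, Bool.false_eq_true, reduceIte, if_true, if_false]
            rw [(ih acc).1]
            try simp [sanConsume, htb, hf, hc]
          · simp only [sanStepA, htb, hf, hc, Bool.false_eq_true, reduceIte, if_true, if_false]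
            rw [(ih acc).2]
            try simp [sanConsume, htb, hf, hc]

-- ===== VERDICT (by name: the statement is the Claim_ definition above) =====
theorem sanitize_log_lines_py_spec : Claim_equal_sanitize_log_lines_py := by
  intro output _
  unfold Spec_sanitize_log_lines_py sanitize_log_lines_py sanitize_log_lines_py_alt
  simpa using (sanFold_key (PySem.Str.splitlines output) []).1
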